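-- pv_equiv track=rewrite | github.com/huikul/TACSEI-release | 01_source code/00_dataset_collection/src/serial_comm.py | extract_with_find_long
-- ===== SOURCE A (Python) =====
-- def extract_with_find_long(str_data):
--     indices = [
--         ('F1_', str_data.find('F1_')),
--         ('F2_', str_data.find('F2_')),
--         ('F3_', str_data.find('F3_')),
--         ('R0', str_data.find('R0')),
--         ('R1', str_data.find('R1')),
--         ('R2', str_data.find('R2')),
--         ('R3', str_data.find('R3')),
--         ('R4', str_data.find('R4')),
--         ('R5', str_data.find('R5')),
--         ('R6', str_data.find('R6')),
--         ('R7', str_data.find('R7')),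
--         ('R8', str_data.find('R8')),
--         (':', str_data.find(':')),
--         ('a', str_data.find('a')),
--         ('b', str_data.find('b')),
--         ('c', str_data.find('c'))
--     ]
--     numbers = []
--     for key, index in indices:
--         if index != -1:
--             start = index + len(key)
--             end = start
--             while end < len(str_data) and str_data[end].isdigit():
--                 end += 1
--             numbers.append(str_data[start:end])
--     return numbers
-- ===== SOURCE B (Python) =====
-- _KEYS = ('F1_', 'F2_', 'F3_', 'R0', 'R1', 'R2', 'R3', 'R4', 'R5', 'R6',
--          'R7', 'R8', ':', 'a', 'b', 'c')
--
--
-- def extract_with_find_long(str_data):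
--     n = len(str_data)
--     # DP pass, back to front: run_end[i] = end of the maximal digit run starting at i
--     run_end = [n]
--     for i in reversed(range(n)):
--         run_end.append(run_end[-1] if str_data[i].isdigit() else i)
--     run_end.reverse()
--     # single forward scan recording the first occurrence of every marker
--     first = {}
--     for i in range(n):
--         for key in _KEYS:
--             if key not in first and str_data.startswith(key, i):
--                 first[key] = i
--     return [str_data[first[key] + len(key):run_end[first[key] + len(key)]]
--             for key in _KEYS if key in first]
-- ===== Notes on version B (the rewrite author's own statement) =====
-- stated objective: alternative
-- what changed: B replaces A's sixteen independent str.find calls and per-marker forward digit while-loops by one back-to-front DP pass precomputing the digit-run end for every position plus one forward scan of the string that records each marker's first occurrence in a dict, then emits the slices from those two tables.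
import Mathlib
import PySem

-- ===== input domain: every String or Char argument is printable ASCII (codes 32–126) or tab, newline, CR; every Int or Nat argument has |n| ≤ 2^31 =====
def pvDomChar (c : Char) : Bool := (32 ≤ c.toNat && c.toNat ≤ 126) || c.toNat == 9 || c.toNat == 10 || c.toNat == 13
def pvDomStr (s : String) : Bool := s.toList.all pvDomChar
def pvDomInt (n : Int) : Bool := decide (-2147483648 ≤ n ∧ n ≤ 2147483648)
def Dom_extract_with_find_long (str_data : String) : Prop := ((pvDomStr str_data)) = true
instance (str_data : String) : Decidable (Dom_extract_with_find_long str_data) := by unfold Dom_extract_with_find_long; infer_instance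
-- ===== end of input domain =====

-- B replaces A's per-marker find + forward digit while-loop by one back-to-front DP table of
-- digit-run ends plus one forward scan recording every marker's first occurrence (objective:
-- alternative algorithm, same cost).

-- ===== PORT A =====
-- the 'while end < len(str_data) and str_data[end].isdigit(): end += 1' loop;
-- 'end' starts at index+len(key) ≥ 0, so it is carried as a Nat
def pvScanA (s : List Char) (e : Nat) : Nat :=
  if h : e < s.length then
    if PySem.Chars.isdigit s[e] then pvScanA s (e + 1) else e
  else e
termination_by s.length - e

def extract_with_find_long (str_data : String) : List String :=
  let s := str_data.toList
  let indices : List (List Char × Int) :=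
    [("F1_".toList, PySem.Chars.find s "F1_".toList),
     ("F2_".toList, PySem.Chars.find s "F2_".toList),
     ("F3_".toList, PySem.Chars.find s "F3_".toList),
     ("R0".toList, PySem.Chars.find s "R0".toList),
     ("R1".toList, PySem.Chars.find s "R1".toList),
     ("R2".toList, PySem.Chars.find s "R2".toList),
     ("R3".toList, PySem.Chars.find s "R3".toList),
     ("R4".toList, PySem.Chars.find s "R4".toList),
     ("R5".toList, PySem.Chars.find s "R5".toList),
     ("R6".toList, PySem.Chars.find s "R6".toList),
     ("R7".toList, PySem.Chars.find s "R7".toList),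
     ("R8".toList, PySem.Chars.find s "R8".toList),
     (":".toList, PySem.Chars.find s ":".toList),
     ("a".toList, PySem.Chars.find s "a".toList),
     ("b".toList, PySem.Chars.find s "b".toList),
     ("c".toList, PySem.Chars.find s "c".toList)]
  indices.foldl
    (fun numbers ki =>
      if ki.2 ≠ -1 then
        let start : Int := ki.2 + ki.1.length
        let e : Nat := pvScanA s start.toNat
        numbers ++ [String.ofList (PySem.List.slice s (some start) (some (e : Int)))]
      else numbers) []

-- ===== PORT B =====
def pvKeys : List (List Char) :=
  ["F1_".toList, "F2_".toList, "F3_".toList, "R0".toList, "R1".toList, "R2".toList,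
   "R3".toList, "R4".toList, "R5".toList, "R6".toList, "R7".toList, "R8".toList,
   ":".toList, "a".toList, "b".toList, "c".toList]

def extract_with_find_long_alt (str_data : String) : List String :=
  let s := str_data.toList
  let n := s.length
  -- 'for i in reversed(range(n)): run_end.append(run_end[-1] if str_data[i].isdigit() else i)'
  -- then 'run_end.reverse()'; run_end[-1] is always defined (the list starts as [n]), ported
  -- as getLastD; str_data[i] with 0 ≤ i < n is ported as pyGetD (always in range here)
  let run_end : List Nat :=
    (((PySem.List.pyRange 0 (n : Int)).reverse).foldl
      (fun re i =>
        re ++ [if PySem.Chars.isdigit (PySem.List.pyGetD s i ' ') then re.getLastD n else i.toNat])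
      [n]).reverse
  -- 'for i in range(n): for key in _KEYS: if key not in first and str_data.startswith(key, i)';
  -- str_data.startswith(key, i) with 0 ≤ i ≤ n is exactly startswith on the drop
  let first : PySem.Dict (List Char) Nat :=
    (PySem.List.pyRange 0 (n : Int)).foldl
      (fun d i =>
        pvKeys.foldl
          (fun d key =>
            if !(d.contains key) && PySem.Chars.startswith (s.drop i.toNat) key
            then d.insert key i.toNat else d) d)
      PySem.Dict.empty
  -- the final comprehension; run_end[start] with start ≤ n is always in range, ported as getD
  pvKeys.foldl
    (fun numbers key =>
      match first.get? key with
      | some i =>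
          numbers ++ [String.ofList (PySem.List.slice s (some ((i + key.length : Nat) : Int))
            (some ((run_end.getD (i + key.length) 0 : Nat) : Int)))]
      | none => numbers) []

-- ===== PRECONDITION & SPEC =====
def Spec_extract_with_find_long (str_data : String) (out : List String) : Prop := out = extract_with_find_long_alt str_data
instance (str_data : String) (out : List String) : Decidable (Spec_extract_with_find_long str_data out) := by unfold Spec_extract_with_find_long; infer_instance

-- ===== CLAIM (what is proved, stated in full; the proofs are below) =====
def Claim_equal_extract_with_find_long : Prop := ∀ (str_data : String), Dom_extract_with_find_long str_data → Spec_extract_with_find_long str_data (extract_with_find_long str_data)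

-- ===== LEMMAS AND PROOFS =====

def pvRunEnd (s : List Char) (j : Nat) : Nat :=
  j + ((s.drop j).takeWhile PySem.Chars.isdigit).length

theorem pvRunEnd_step (s : List Char) (j : Nat) (h : j < s.length) :
    pvRunEnd s j = if PySem.Chars.isdigit s[j] then pvRunEnd s (j + 1) else j := by
  unfold pvRunEnd
  by_cases hd : PySem.Chars.isdigit s[j]
  · rw [List.drop_eq_getElem_cons h, List.takeWhile_cons_of_pos hd]
    simp [hd]; omega
  · rw [List.drop_eq_getElem_cons h, List.takeWhile_cons_of_neg (by simp [hd])]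
    simp [hd]

-- A's while-loop stops after exactly the digit prefix of s.drop e
theorem pvScanA_eq (s : List Char) (e : Nat) : pvScanA s e = pvRunEnd s e := by
  unfold pvRunEnd
  fun_induction pvScanA s e with
  | case1 e h hd ih =>
    rw [ih]
    rw [List.drop_eq_getElem_cons h, List.takeWhile_cons_of_pos hd]
    simp; omega
  | case2 e h hd =>
    rw [List.drop_eq_getElem_cons h, List.takeWhile_cons_of_neg (by simp [hd])]
    simp
  | case3 e h =>
    rw [List.drop_eq_nil_of_le (by omega)]
    simp


theorem pvGetLastD_reverse (l : List Nat) (d : Nat) : (l.reverse).getLastD d = l.headD d := by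
  cases l with
  | nil => rfl
  | cons a t => rw [List.reverse_cons, List.getLastD_concat]; rfl

theorem pvRunEndTable (s : List Char) :
    ((((PySem.List.pyRange 0 (s.length : Int)).reverse).foldl
      (fun re i =>
        re ++ [if PySem.Chars.isdigit (PySem.List.pyGetD s i ' ') then re.getLastD s.length else i.toNat])
      [s.length]).reverse)
    = (List.range (s.length + 1)).map (fun t => pvRunEnd s t) := by
  rw [PySem.List.pyRange_zero_natCast, ← List.map_reverse, List.foldl_map, List.foldl_reverse]
  have key : ∀ (m a : Nat), a + m = s.length →
      List.foldr
        (fun (x : Nat) (re : List Nat) =>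
          re ++ [if PySem.Chars.isdigit (PySem.List.pyGetD s (↑x) ' ') then re.getLastD s.length else (↑x : Int).toNat])
        [s.length] (List.range' a m)
      = ((List.range (m + 1)).map (fun t => pvRunEnd s (a + t))).reverse := by
    intro m
    induction m with
    | zero =>
      intro a ha
      have : pvRunEnd s a = s.length := by
        unfold pvRunEnd
        rw [List.drop_eq_nil_of_le (by omega)]
        simp; omega
      simp [List.range_one, this]
    | succ m ih =>
      intro a ha
      rw [List.range'_succ, List.foldr_cons, ih (a + 1) (by omega)]
      have halen : a < s.length := by omega
      have hget : PySem.List.pyGetD s (↑a) ' ' = s[a] := by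
        rw [PySem.List.pyGetD_natCast]
        simp [List.getD_eq_getElem?_getD, halen]
      have hlast : (((List.range (m + 1)).map (fun t => pvRunEnd s (a + 1 + t))).reverse).getLastD s.length
          = pvRunEnd s (a + 1) := by
        rw [pvGetLastD_reverse, List.range_succ_eq_map]
        simp
      have hstep := pvRunEnd_step s a halen
      rw [hget, hlast, Int.toNat_natCast, ← hstep]
      conv_rhs => rw [List.range_succ_eq_map, List.map_cons, List.map_map, List.reverse_cons]
      congr 2
      apply List.map_congr_left; intro t _
      show pvRunEnd s (a + 1 + t) = pvRunEnd s (a + Nat.succ t)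
      congr 1; omega
  rw [List.range_eq_range']
  have := key s.length 0 (by omega)
  rw [this]
  simp
theorem pvInnerFold (ks : List (List Char)) (q : List Char → Bool) (i : Nat)
    (d : PySem.Dict (List Char) Nat) (k : List Char) :
    (ks.foldl (fun d key => if !(d.contains key) && q key then d.insert key i else d) d).get? k
    = if k ∈ ks ∧ d.contains k = false ∧ q k = true then some i else d.get? k := by
  induction ks generalizing d with
  | nil => simp
  | cons a t ih =>
    simp only [List.foldl_cons, ih]
    by_cases hak : a = k
    · subst hak
      by_cases hc : d.contains a
      · simp [hc]
      · simp only [Bool.not_eq_true] at hc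
        by_cases hq : q a
        · simp [hc, hq, PySem.Dict.contains_insert_self, PySem.Dict.get?_insert_self]
        · simp [hc, hq]
    · have h1 : ∀ v, (d.insert a v).contains k = d.contains k := by
        intro v; rw [PySem.Dict.contains_insert]; simp [Ne.symm hak]
      have h2 : ∀ v, (d.insert a v).get? k = d.get? k := by
        intro v; rw [PySem.Dict.get?_insert]; simp [Ne.symm hak]
      have hka : ¬ k = a := Ne.symm hak
      by_cases hb : (!(d.contains a) && q a)
      · simp only [hb, if_true, h1, h2]
        simp [hka]
      · simp only [hb]
        simp [hka]


theorem pvFindRange (p : Nat → Bool) (n j : Nat) (hj : j < n) (hpj : p j = true)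
    (hmin : ∀ i, i < j → p i = false) : (List.range n).find? p = some j := by
  rw [List.range_eq_range']
  suffices h : ∀ (a m : Nat), (∀ i, i < a → p i = false) → a ≤ j → j < a + m →
      (List.range' a m).find? p = some j by
    exact h 0 n (fun i hi => hmin i (lt_of_lt_of_le hi (Nat.zero_le j))) (Nat.zero_le j) (by omega)
  intro a m
  induction m generalizing a with
  | zero => omega
  | succ m ih =>
    intro hlow haj hjm
    rw [List.range'_succ, List.find?_cons]
    by_cases hpa : p a
    · have : a = j := by
        by_contra hne
        have := hmin a (by omega)
        simp [this] at hpa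
      subst this; simp [hpj]
    · simp only [hpa]
      have : a ≠ j := fun h => by simp [h, hpj] at hpa
      exact ih (a+1) (fun i hi => by rcases Nat.lt_succ_iff_lt_or_eq.mp hi with h|h; exact hlow i h; simp [h, hpa]) (by omega) (by omega)


theorem pvOuterFold (s : List Char) (k : List Char) (hk : k ∈ pvKeys) (L : List Int)
    (d : PySem.Dict (List Char) Nat) :
    ((L.foldl
        (fun d i =>
          pvKeys.foldl
            (fun d key =>
              if !(d.contains key) && PySem.Chars.startswith (s.drop i.toNat) key
              then d.insert key i.toNat else d) d) d).get? k)
    = (d.get? k).or ((L.find? (fun i => PySem.Chars.startswith (s.drop i.toNat) k)).map (·.toNat)) := by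
  induction L generalizing d with
  | nil => simp
  | cons i t ih =>
    rw [List.foldl_cons, ih, pvInnerFold]
    rcases hg : d.get? k with _ | v
    · have hc : d.contains k = false := by
        rw [PySem.Dict.contains_eq_isSome_get?, hg]; rfl
      by_cases hp : PySem.Chars.startswith (s.drop i.toNat) k
      · simp [hk, hc, hp]
      · simp [hp]
    · have hc : d.contains k = true := by
        rw [PySem.Dict.contains_eq_isSome_get?, hg]; rfl
    
      simp [hc]


theorem pvFindEq (s k : List Char) (hk : k ≠ []) :
    (((PySem.List.pyRange 0 (s.length : Int)).find?
        (fun i => PySem.Chars.startswith (s.drop i.toNat) k)).map (·.toNat))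
    = if PySem.Chars.find s k = -1 then none else some (PySem.Chars.find s k).toNat := by
  rw [PySem.List.pyRange_zero_natCast, List.find?_map]
  by_cases h : PySem.Chars.find s k = -1
  · rw [if_pos h]
    have hni : ¬ k <:+: s := (PySem.Chars.find_eq_neg_one_iff s k).mp h
    have : (List.range s.length).find? ((fun i => PySem.Chars.startswith (s.drop i.toNat) k) ∘ (fun j : Nat => (j : Int))) = none := by
      rw [List.find?_eq_none]
      intro j _
      simp only [Function.comp, Int.toNat_natCast, PySem.Chars.startswith_iff]
      intro hpre
      exact hni ((PySem.Chars.isIn_iff_infix k s).mp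
        ((PySem.Chars.exists_prefix_drop_iff_isIn k s).mp ⟨j, hpre⟩))
    rw [this]; rfl
  · rw [if_neg h]
    have h0 : 0 ≤ PySem.Chars.find s k := by
      have := PySem.Chars.neg_one_le_find s k; omega
    obtain ⟨hpre, hmin⟩ := PySem.Chars.find_spec h0
    set j := (PySem.Chars.find s k).toNat with hj
    have hjlen : j < s.length := by
      rcases hpre with ⟨u, hu⟩
      have : k.length + u.length = (s.drop j).length := by rw [← hu]; simp
      simp only [List.length_drop] at this
      have hkpos : 0 < k.length := List.length_pos_iff.mpr hk
      omega
    have := pvFindRange (fun j : Nat => PySem.Chars.startswith (s.drop j) k) s.length j hjlen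
      (by rw [PySem.Chars.startswith_iff]; exact hpre)
      (by intro i hi; rw [Bool.eq_false_iff, ne_eq, PySem.Chars.startswith_iff]; exact hmin i hi)
    have heq : ((fun i : Int => PySem.Chars.startswith (s.drop i.toNat) k) ∘ (fun j : Nat => (j : Int)))
        = fun j : Nat => PySem.Chars.startswith (s.drop j) k := by
      funext j; simp [Function.comp]
    rw [heq, this]
    simp

-- ===== VERDICT (by name: the statement is the Claim_ definition above) =====
theorem pvTableGetD (s : List Char) (t : Nat) (ht : t ≤ s.length) :
    ((List.range (s.length + 1)).map (fun t => pvRunEnd s t)).getD t 0 = pvRunEnd s t := by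
  rw [List.getD_eq_getElem?_getD, List.getElem?_map, List.getElem?_range (by omega)]
  rfl

theorem pvStartLe (s key : List Char)
    (h : PySem.Chars.find s key ≠ -1) :
    (PySem.Chars.find s key).toNat + key.length ≤ s.length := by
  have h0 : 0 ≤ PySem.Chars.find s key := by
    have := PySem.Chars.neg_one_le_find s key; omega
  obtain ⟨⟨u, hu⟩, -⟩ := PySem.Chars.find_spec h0
  have : key.length + u.length = (s.drop (PySem.Chars.find s key).toNat).length := by
    rw [← hu]; simp
  simp only [List.length_drop] at this
  have := PySem.Chars.find_le_length s key
  omega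

theorem extract_with_find_long_spec : Claim_equal_extract_with_find_long := by
  intro str_data _
  show extract_with_find_long str_data = extract_with_find_long_alt str_data
  simp only [extract_with_find_long, extract_with_find_long_alt]
  have hind : ([("F1_".toList, PySem.Chars.find str_data.toList "F1_".toList),
     ("F2_".toList, PySem.Chars.find str_data.toList "F2_".toList),
     ("F3_".toList, PySem.Chars.find str_data.toList "F3_".toList),
     ("R0".toList, PySem.Chars.find str_data.toList "R0".toList),
     ("R1".toList, PySem.Chars.find str_data.toList "R1".toList),
     ("R2".toList, PySem.Chars.find str_data.toList "R2".toList),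
     ("R3".toList, PySem.Chars.find str_data.toList "R3".toList),
     ("R4".toList, PySem.Chars.find str_data.toList "R4".toList),
     ("R5".toList, PySem.Chars.find str_data.toList "R5".toList),
     ("R6".toList, PySem.Chars.find str_data.toList "R6".toList),
     ("R7".toList, PySem.Chars.find str_data.toList "R7".toList),
     ("R8".toList, PySem.Chars.find str_data.toList "R8".toList),
     (":".toList, PySem.Chars.find str_data.toList ":".toList),
     ("a".toList, PySem.Chars.find str_data.toList "a".toList),
     ("b".toList, PySem.Chars.find str_data.toList "b".toList),
     ("c".toList, PySem.Chars.find str_data.toList "c".toList)])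
      = pvKeys.map (fun k => (k, PySem.Chars.find str_data.toList k)) := by
    simp [pvKeys]
  rw [hind, List.foldl_map]
  apply PySem.List.foldl_congr_mem'
  intro key hk numbers
  have hne : key ≠ [] := by fin_cases hk <;> decide
  rw [pvOuterFold str_data.toList key hk, pvRunEndTable]
  rw [PySem.Dict.get?_empty, Option.none_or, pvFindEq str_data.toList key hne]
  by_cases h : PySem.Chars.find str_data.toList key = -1
  · simp [h]
  · have h0 : 0 ≤ PySem.Chars.find str_data.toList key := by
      have := PySem.Chars.neg_one_le_find str_data.toList key; omega
    have hc : PySem.Chars.find str_data.toList key + (key.length : Int)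
        = (((PySem.Chars.find str_data.toList key).toNat + key.length : Nat) : Int) := by omega
    simp only [h, if_false, ne_eq, not_false_eq_true, if_true]
    rw [pvTableGetD _ _ (pvStartLe _ _ h), hc, Int.toNat_natCast, pvScanA_eq]
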